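-- pv_equiv track=rewrite | github.com/LucasCallamullo/Clases-Particulares | Trabajos Practicos y DESAFIOS/TRABAJO PRACTICO 2/Ema_tp_2.py | validar_direccion
-- ===== SOURCE A (Python) =====
-- def validar_direccion(direccion):
--     tiene_mayuscula = False
--     for i in direccion:
--         if i != " " and i != ".":
--             if not "a" <= i.lower() <= "z" and not "0" <= i <= "9":
--                 return False            # no cumple
--
--             # para detectar dos mayusculas seguidas
--             if tiene_mayuscula and "A" <= i <= "Z":
--                 return False
--             elif "A" <= i <= "Z":
--                 tiene_mayuscula = True
--             else:
--                 tiene_mayuscula = False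
--     return True
-- ===== SOURCE B (Python) =====
-- def validar_direccion(direccion):
--     filtrados = [c for c in direccion if c != " " and c != "."]
--     if not all("a" <= c.lower() <= "z" or "0" <= c <= "9" for c in filtrados):
--         return False
--     return not any("A" <= a <= "Z" and "A" <= b <= "Z"
--                    for a, b in zip(filtrados, filtrados[1:]))
-- ===== Notes on version B (the rewrite author's own statement) =====
-- stated objective: simpler
-- what changed: Replaces A's single stateful loop with early returns by a filter of the separator characters followed by two stateless whole-list checks: an all() for character validity and an any() over adjacent filtered pairs for two consecutive uppercase letters.
import Mathlib
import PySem

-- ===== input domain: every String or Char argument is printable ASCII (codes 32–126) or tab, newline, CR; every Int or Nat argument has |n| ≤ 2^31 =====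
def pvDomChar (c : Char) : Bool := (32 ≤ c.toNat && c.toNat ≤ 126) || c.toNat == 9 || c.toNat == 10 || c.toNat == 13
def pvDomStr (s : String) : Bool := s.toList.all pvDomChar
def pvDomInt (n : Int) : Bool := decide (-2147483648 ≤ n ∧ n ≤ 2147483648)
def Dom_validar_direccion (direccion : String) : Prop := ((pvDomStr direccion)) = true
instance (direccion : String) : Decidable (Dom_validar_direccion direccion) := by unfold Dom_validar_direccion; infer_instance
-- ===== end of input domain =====

-- B replaces A's stateful one-pass loop with a separator filter followed by two stateless
-- whole-list checks (all chars valid; no adjacent filtered pair both uppercase): simpler decomposition.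

-- ===== PORT A =====
-- A's for-loop with the tiene_mayuscula flag and early returns, as structural recursion on the chars
def pvALoop : List Char → Bool → Bool
  | [], _ => true
  | i :: rest, tiene_mayuscula =>
    if i ≠ ' ' ∧ i ≠ '.' then
      if ¬('a' ≤ PySem.Chars.lowerChar i ∧ PySem.Chars.lowerChar i ≤ 'z') ∧ ¬('0' ≤ i ∧ i ≤ '9') then
        false
      else if tiene_mayuscula ∧ ('A' ≤ i ∧ i ≤ 'Z') then
        false
      else if 'A' ≤ i ∧ i ≤ 'Z' then
        pvALoop rest true
      else
        pvALoop rest false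
    else
      pvALoop rest tiene_mayuscula

def validar_direccion (direccion : String) : Bool :=
  pvALoop direccion.toList false

-- ===== PORT B =====
def pvValido (c : Char) : Bool :=
  ('a' ≤ PySem.Chars.lowerChar c && PySem.Chars.lowerChar c ≤ 'z') || ('0' ≤ c && c ≤ '9')

def pvMayus (c : Char) : Bool := 'A' ≤ c && c ≤ 'Z'

def validar_direccion_alt (direccion : String) : Bool :=
  let filtrados := direccion.toList.filter (fun c => c ≠ ' ' ∧ c ≠ '.')
  if ¬ (filtrados.all pvValido) then false
  else ! ((filtrados.zip (List.drop 1 filtrados)).any (fun p => pvMayus p.1 && pvMayus p.2))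

-- ===== PRECONDITION & SPEC =====
def Spec_validar_direccion (direccion : String) (out : Bool) : Prop := out = validar_direccion_alt direccion
instance (direccion : String) (out : Bool) : Decidable (Spec_validar_direccion direccion out) := by unfold Spec_validar_direccion; infer_instance

-- ===== CLAIM (what is proved, stated in full; the proofs are below) =====
def Claim_equal_validar_direccion : Prop := ∀ (direccion : String), Dom_validar_direccion direccion → Spec_validar_direccion direccion (validar_direccion direccion)

-- ===== LEMMAS AND PROOFS =====

-- adjacency check on the filtered list, with the incoming flag
def pvNoAdj : Bool → List Char → Bool
  | _, [] => true
  | flag, c :: rest => if flag && pvMayus c then false else pvNoAdj (pvMayus c) rest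

-- A's loop is the conjunction of validity of the filtered chars and the adjacency check
theorem pvALoop_eq (l : List Char) : ∀ flag,
    pvALoop l flag =
      ((l.filter (fun c => c ≠ ' ' ∧ c ≠ '.')).all pvValido
        && pvNoAdj flag (l.filter (fun c => c ≠ ' ' ∧ c ≠ '.'))) := by
  induction l with
  | nil => intro flag; simp [pvALoop, pvNoAdj]
  | cons c rest ih =>
    intro flag
    simp only [pvALoop]
    by_cases hs : c ≠ ' ' ∧ c ≠ '.'
    · rw [if_pos hs]
      have hf : (c :: rest).filter (fun c => c ≠ ' ' ∧ c ≠ '.')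
          = c :: rest.filter (fun c => c ≠ ' ' ∧ c ≠ '.') := by
        simp only [List.filter_cons, (by simpa using hs : (decide (c ≠ ' ' ∧ c ≠ '.')) = true),
          if_pos]
      rw [hf]
      simp only [List.all_cons, pvNoAdj]
      by_cases hv : pvValido c = true
      · have h1 : ¬ ¬('a' ≤ PySem.Chars.lowerChar c ∧ PySem.Chars.lowerChar c ≤ 'z')
            ∨ ¬ ¬('0' ≤ c ∧ c ≤ '9') := by
          simp only [pvValido, Bool.or_eq_true, Bool.and_eq_true, decide_eq_true_eq] at hv
          tauto
        rw [if_neg (by tauto)]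
        by_cases hm : ('A' ≤ c ∧ c ≤ 'Z')
        · have hmb : pvMayus c = true := by simp [pvMayus]; exact hm
          cases flag with
          | false =>
            rw [if_neg (by simp), if_pos hm, ih true, hmb]
            simp [hv]
          | true =>
            rw [if_pos ⟨rfl, hm⟩, hmb]
            simp
        · have hmb : pvMayus c = false := by
            have : pvMayus c ≠ true := by simpa [pvMayus] using hm
            exact Bool.eq_false_iff.mpr this
          rw [if_neg (by tauto), if_neg hm, ih false, hmb]
          simp [hv]
      · have h1 : ¬('a' ≤ PySem.Chars.lowerChar c ∧ PySem.Chars.lowerChar c ≤ 'z') := by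
          intro hc; exact hv (by simp [pvValido]; exact Or.inl hc)
        have h2 : ¬('0' ≤ c ∧ c ≤ '9') := by
          intro hc; exact hv (by simp [pvValido]; exact Or.inr hc)
        rw [if_pos ⟨h1, h2⟩]
        have hvb : pvValido c = false := Bool.eq_false_iff.mpr hv
        simp [hvb]
    · rw [if_neg hs]
      have hf : (c :: rest).filter (fun c => c ≠ ' ' ∧ c ≠ '.')
          = rest.filter (fun c => c ≠ ' ' ∧ c ≠ '.') := by
        simp only [List.filter_cons, (by simpa using hs : (decide (c ≠ ' ' ∧ c ≠ '.')) = false),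
          if_neg, Bool.false_eq_true, not_false_iff]
      rw [hf]
      exact ih flag

def pvHeadM : List Char → Bool
  | [] => false
  | c :: _ => pvMayus c

-- the stateless zip-any form of the adjacency check
theorem pvNoAdj_eq (l : List Char) : ∀ flag,
    pvNoAdj flag l
      = ! ((flag && pvHeadM l) || (l.zip (List.drop 1 l)).any (fun p => pvMayus p.1 && pvMayus p.2)) := by
  induction l with
  | nil => intro flag; simp [pvNoAdj, pvHeadM]
  | cons c rest ih =>
    intro flag
    have hz : ((c :: rest).zip (List.drop 1 (c :: rest))).any (fun p => pvMayus p.1 && pvMayus p.2)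
        = ((pvMayus c && pvHeadM rest)
            || (rest.zip (List.drop 1 rest)).any (fun p => pvMayus p.1 && pvMayus p.2)) := by
      cases rest with
      | nil => simp [pvHeadM]
      | cons d t => simp [pvHeadM, List.zip]
    simp only [pvNoAdj, hz, pvHeadM]
    by_cases hf : (flag && pvMayus c) = true
    · simp [hf]
    · have hfe : (flag && pvMayus c) = false := Bool.eq_false_iff.mpr hf
      rw [if_neg (by simp [hfe]), ih (pvMayus c), hfe]
      cases rest <;> simp [pvHeadM]

-- ===== VERDICT (by name: the statement is the Claim_ definition above) =====
theorem validar_direccion_spec : Claim_equal_validar_direccion := by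
  intro direccion _
  unfold Spec_validar_direccion validar_direccion validar_direccion_alt
  rw [pvALoop_eq, pvNoAdj_eq]
  by_cases h : ((direccion.toList.filter (fun c => c ≠ ' ' ∧ c ≠ '.')).all pvValido) = true
  · rw [if_neg (not_not_intro h), h]
    simp [pvHeadM]
  · rw [if_pos h, Bool.eq_false_iff.mpr h]
    simp
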